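-- pv_equiv track=rewrite | github.com/kkonevets/pat | features.py | compare_mpk_level
-- ===== SOURCE A (Python) =====
-- def compare_mpk_level(mpk1, mpk2, tag):
--     matched = {}
--     for i, m1 in enumerate(mpk1):
--         v1 = m1.get(tag)
--         if v1 is None:
--             continue
--         for j, m2 in enumerate(mpk2):
--             v2 = m2.get(tag)
--             if v2 is None:
--                 continue
--             if v1 == v2:
--                 ixs = matched.get(v1)
--                 if ixs is None:
--                     ixs = (set(), set())
--                     matched[v1] = ixs
--                 ixs[0].update([i])
--                 ixs[1].update([j])
--     return matched
-- ===== SOURCE B (Python) =====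
-- def compare_mpk_level(mpk1, mpk2, tag):
--     idx2 = {}
--     for j, m2 in enumerate(mpk2):
--         v2 = m2.get(tag)
--         if v2 is not None:
--             idx2.setdefault(v2, []).append(j)
--     matched = {}
--     for i, m1 in enumerate(mpk1):
--         v1 = m1.get(tag)
--         if v1 is None or v1 not in idx2:
--             continue
--         if v1 in matched:
--             matched[v1][0].add(i)
--         else:
--             matched[v1] = ({i}, set(idx2[v1]))
--     return matched
-- ===== Notes on version B (the rewrite author's own statement) =====
-- stated objective: alternative
-- what changed: Replaced the nested scan of mpk2 for every element of mpk1 by a single pre-pass building a tag-value -> index-list dictionary for mpk2, so the main loop over mpk1 does one dictionary lookup per element instead of an inner scan.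
import Mathlib
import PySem

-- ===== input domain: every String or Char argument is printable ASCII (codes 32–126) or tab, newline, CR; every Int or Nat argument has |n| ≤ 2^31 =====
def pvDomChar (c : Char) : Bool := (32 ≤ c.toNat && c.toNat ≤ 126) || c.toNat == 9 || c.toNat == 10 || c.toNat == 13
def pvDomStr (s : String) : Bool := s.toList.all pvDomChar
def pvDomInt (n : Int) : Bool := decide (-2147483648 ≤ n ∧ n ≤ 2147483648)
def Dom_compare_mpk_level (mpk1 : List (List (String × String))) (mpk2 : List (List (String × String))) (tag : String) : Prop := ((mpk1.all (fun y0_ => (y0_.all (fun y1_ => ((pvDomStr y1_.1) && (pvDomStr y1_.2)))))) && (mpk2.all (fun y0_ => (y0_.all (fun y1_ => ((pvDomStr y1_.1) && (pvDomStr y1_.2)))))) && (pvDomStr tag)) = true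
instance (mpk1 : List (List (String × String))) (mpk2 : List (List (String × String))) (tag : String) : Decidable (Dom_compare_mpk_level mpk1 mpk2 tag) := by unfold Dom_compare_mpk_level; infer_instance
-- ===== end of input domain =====

-- B replaces the nested scan of mpk2 per mpk1-element by one precomputed value->indices dict for mpk2 (alternative decomposition; equal return value proved).


-- ===== PORT A =====
def compare_mpk_level (mpk1 : List (List (String × String))) (mpk2 : List (List (String × String))) (tag : String) : List (String × List Int × List Int) :=
  ((PySem.List.enumerate mpk1 0).foldl (fun matched (p1 : Int × List (String × String)) =>
      match (PySem.Dict.mk p1.2).get? tag with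
      | none => matched
      | some v1 =>
        (PySem.List.enumerate mpk2 0).foldl (fun matched (p2 : Int × List (String × String)) =>
            match (PySem.Dict.mk p2.2).get? tag with
            | none => matched
            | some v2 =>
              if v1 == v2 then
                -- ixs = matched.get(v1) or freshly inserted (set(), set()); the in-place
                -- set mutations are modelled as overwriting the value at key v1
                let ixs := matched.getD v1 ((PySem.Set.empty : PySem.Set Int), (PySem.Set.empty : PySem.Set Int))
                matched.insert v1 (PySem.Set.add ixs.1 p1.1, PySem.Set.add ixs.2 p2.1)
              else matched) matched)
    (PySem.Dict.empty : PySem.Dict String (PySem.Set Int × PySem.Set Int))).items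

-- ===== PORT B =====
def compare_mpk_level_alt (mpk1 : List (List (String × String))) (mpk2 : List (List (String × String))) (tag : String) : List (String × List Int × List Int) :=
  -- idx2: tag value -> list of indices in mpk2 (setdefault+append modelled as overwrite)
  let idx2 : PySem.Dict String (List Int) :=
    (PySem.List.enumerate mpk2 0).foldl (fun d (p2 : Int × List (String × String)) =>
        match (PySem.Dict.mk p2.2).get? tag with
        | none => d
        | some v2 => d.insert v2 (d.getD v2 [] ++ [p2.1])) PySem.Dict.empty
  ((PySem.List.enumerate mpk1 0).foldl (fun matched (p1 : Int × List (String × String)) =>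
      match (PySem.Dict.mk p1.2).get? tag with
      | none => matched
      | some v1 =>
        match idx2.get? v1 with
        | none => matched
        | some js =>
          if matched.contains v1 then
            -- matched[v1][0].add(i), an in-place set mutation
            matched.modify v1 ((PySem.Set.empty : PySem.Set Int), (PySem.Set.empty : PySem.Set Int)) (fun p => (PySem.Set.add p.1 p1.1, p.2))
          else
            matched.insert v1 ((PySem.Set.ofList [p1.1] : PySem.Set Int), PySem.Set.ofList js))
    (PySem.Dict.empty : PySem.Dict String (PySem.Set Int × PySem.Set Int))).items

-- ===== PRECONDITION & SPEC =====
def Spec_compare_mpk_level (mpk1 : List (List (String × String))) (mpk2 : List (List (String × String))) (tag : String) (out : List (String × List Int × List Int)) : Prop := out = compare_mpk_level_alt mpk1 mpk2 tag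
instance (mpk1 : List (List (String × String))) (mpk2 : List (List (String × String))) (tag : String) (out : List (String × List Int × List Int)) : Decidable (Spec_compare_mpk_level mpk1 mpk2 tag out) := by unfold Spec_compare_mpk_level; infer_instance

-- ===== CLAIM (what is proved, stated in full; the proofs are below) =====
def Claim_equal_compare_mpk_level : Prop := ∀ (mpk1 : List (List (String × String))) (mpk2 : List (List (String × String))) (tag : String), Dom_compare_mpk_level mpk1 mpk2 tag → Spec_compare_mpk_level mpk1 mpk2 tag (compare_mpk_level mpk1 mpk2 tag)

-- ===== LEMMAS AND PROOFS =====
-- helper definitions and lemmas (proofs only)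

def pvVal (tag : String) (m : List (String × String)) : Option String :=
  (PySem.Dict.mk m).get? tag

def pvJ (tag : String) (v : String) (l : List (Int × List (String × String))) : List Int :=
  (l.filter (fun p => pvVal tag p.2 == some v)).map (·.1)

def pvInnerStep (tag : String) (v1 : String) (i : Int)
    (matched : PySem.Dict String (PySem.Set Int × PySem.Set Int))
    (p2 : Int × List (String × String)) : PySem.Dict String (PySem.Set Int × PySem.Set Int) :=
  match (PySem.Dict.mk p2.2).get? tag with
  | none => matched
  | some v2 =>
    if v1 == v2 then
      let ixs := matched.getD v1 ((PySem.Set.empty : PySem.Set Int), (PySem.Set.empty : PySem.Set Int))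
      matched.insert v1 (PySem.Set.add ixs.1 i, PySem.Set.add ixs.2 p2.1)
    else matched

def pvStepA (tag : String) (mpk2 : List (List (String × String)))
    (matched : PySem.Dict String (PySem.Set Int × PySem.Set Int))
    (p1 : Int × List (String × String)) : PySem.Dict String (PySem.Set Int × PySem.Set Int) :=
  match (PySem.Dict.mk p1.2).get? tag with
  | none => matched
  | some v1 => (PySem.List.enumerate mpk2 0).foldl (pvInnerStep tag v1 p1.1) matched

def pvIdxStep (tag : String) (d : PySem.Dict String (List Int))
    (p2 : Int × List (String × String)) : PySem.Dict String (List Int) :=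
  match (PySem.Dict.mk p2.2).get? tag with
  | none => d
  | some v2 => d.insert v2 (d.getD v2 [] ++ [p2.1])

def pvIdx (tag : String) (mpk2 : List (List (String × String))) : PySem.Dict String (List Int) :=
  (PySem.List.enumerate mpk2 0).foldl (pvIdxStep tag) PySem.Dict.empty

def pvStepB (tag : String) (idx2 : PySem.Dict String (List Int))
    (matched : PySem.Dict String (PySem.Set Int × PySem.Set Int))
    (p1 : Int × List (String × String)) : PySem.Dict String (PySem.Set Int × PySem.Set Int) :=
  match (PySem.Dict.mk p1.2).get? tag with
  | none => matched
  | some v1 =>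
    match idx2.get? v1 with
    | none => matched
    | some js =>
      if matched.contains v1 then
        matched.modify v1 ((PySem.Set.empty : PySem.Set Int), (PySem.Set.empty : PySem.Set Int))
          (fun p => (PySem.Set.add p.1 p1.1, p.2))
      else
        matched.insert v1 ((PySem.Set.ofList [p1.1] : PySem.Set Int), PySem.Set.ofList js)

theorem pvA_eq (mpk1 mpk2 : List (List (String × String))) (tag : String) :
    compare_mpk_level mpk1 mpk2 tag
      = ((PySem.List.enumerate mpk1 0).foldl (pvStepA tag mpk2) PySem.Dict.empty).items := rfl

theorem pvB_eq (mpk1 mpk2 : List (List (String × String))) (tag : String) :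
    compare_mpk_level_alt mpk1 mpk2 tag
      = ((PySem.List.enumerate mpk1 0).foldl (pvStepB tag (pvIdx tag mpk2)) PySem.Dict.empty).items := rfl

-- pvJ over a cons
theorem pvJ_cons (tag v : String) (p : Int × List (String × String)) (t : List (Int × List (String × String))) :
    pvJ tag v (p :: t) = (if pvVal tag p.2 = some v then [p.1] else []) ++ pvJ tag v t := by
  simp only [pvJ, List.filter_cons]
  by_cases h : pvVal tag p.2 = some v
  · simp [h]
  · simp [h]

-- characterisation of the idx2 build
theorem pvIdx_get (tag v : String) (l : List (Int × List (String × String)))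
    (d : PySem.Dict String (List Int)) :
    (l.foldl (pvIdxStep tag) d).get? v
      = match d.get? v with
        | some js => some (js ++ pvJ tag v l)
        | none => if pvJ tag v l = [] then none else some (pvJ tag v l) := by
  induction l generalizing d with
  | nil =>
    simp [pvJ]
    cases d.get? v <;> simp
  | cons p t ih =>
    rw [List.foldl_cons, ih, pvJ_cons]
    show (match (pvIdxStep tag d p).get? v with
        | some js => some (js ++ pvJ tag v t)
        | none => if pvJ tag v t = [] then none else some (pvJ tag v t)) = _
    unfold pvIdxStep
    cases hv : (PySem.Dict.mk p.2).get? tag with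
    | none =>
      have : pvVal tag p.2 = none := hv
      simp [this]
    | some v2 =>
      have hval : pvVal tag p.2 = some v2 := hv
      by_cases he : v2 = v
      · subst he
        rw [PySem.Dict.get?_insert_self]
        simp only [hval]
        rw [PySem.Dict.getD_eq_get?_getD]
        cases h : d.get? v2 <;> simp
      · rw [PySem.Dict.get?_insert]
        have hnv : ¬ (pvVal tag p.2 = some v) := by simp [hval, he]
        have hne : ¬ v = v2 := fun h => he (Eq.symm h)
        simp [hnv, hne]

theorem pvSet_add_add (s : PySem.Set Int) (x : Int) :
    PySem.Set.add (PySem.Set.add s x) x = PySem.Set.add s x :=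
  PySem.Set.add_of_mem ((PySem.Set.mem_add ..).mpr (Or.inr rfl))

theorem pvFoldl_add_subset (l : List Int) (s : PySem.Set Int) (h : ∀ x ∈ l, x ∈ s) :
    l.foldl PySem.Set.add s = s := by
  induction l generalizing s with
  | nil => rfl
  | cons x t ih =>
    rw [List.foldl_cons, PySem.Set.add_of_mem (h x (by simp))]
    exact ih s (fun y hy => h y (by simp [hy]))

-- characterisation of A's inner loop over mpk2
theorem pvInner_eq (tag v1 : String) (i : Int) (l : List (Int × List (String × String)))
    (matched : PySem.Dict String (PySem.Set Int × PySem.Set Int)) :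
    l.foldl (pvInnerStep tag v1 i) matched =
      if pvJ tag v1 l = [] then matched
      else
        matched.insert v1
          (PySem.Set.add (matched.getD v1 (PySem.Set.empty, PySem.Set.empty)).1 i,
           (pvJ tag v1 l).foldl PySem.Set.add (matched.getD v1 (PySem.Set.empty, PySem.Set.empty)).2) := by
  induction l generalizing matched with
  | nil => simp [pvJ]
  | cons p t ih =>
    rw [List.foldl_cons]
    cases hv : (PySem.Dict.mk p.2).get? tag with
    | none =>
      have hstep : pvInnerStep tag v1 i matched p = matched := by
        unfold pvInnerStep; rw [hv]
      have hval : pvVal tag p.2 = none := hv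
      rw [hstep, ih, pvJ_cons, hval]
      simp
    | some v2 =>
      have hval : pvVal tag p.2 = some v2 := hv
      by_cases h12 : v1 = v2
      · subst h12
        have hstep : pvInnerStep tag v1 i matched p
            = matched.insert v1
                (PySem.Set.add (matched.getD v1 (PySem.Set.empty, PySem.Set.empty)).1 i,
                 PySem.Set.add (matched.getD v1 (PySem.Set.empty, PySem.Set.empty)).2 p.1) := by
          unfold pvInnerStep; rw [hv]; simp
        rw [hstep, ih, pvJ_cons, if_pos hval]
        simp only [List.cons_append, List.nil_append]
        by_cases ht : pvJ tag v1 t = []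
        · rw [if_pos ht, if_neg (List.cons_ne_nil _ _), ht]
          rfl
        · rw [if_neg ht, if_neg (List.cons_ne_nil _ _)]
          rw [PySem.Dict.getD_insert_self, PySem.Dict.insert_insert_self]
          rw [List.foldl_cons, pvSet_add_add]
      · have hstep : pvInnerStep tag v1 i matched p = matched := by
          unfold pvInnerStep; rw [hv]; simp [h12]
        have hpred : ¬ (pvVal tag p.2 = some v1) := by
          rw [hval]; exact fun h => h12 (Option.some.inj h).symm
        rw [hstep, ih, pvJ_cons, if_neg hpred]
        simp

-- invariant: every stored pair's second component is the full j-index set of its key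
def pvInv (tag : String) (mpk2 : List (List (String × String)))
    (matched : PySem.Dict String (PySem.Set Int × PySem.Set Int)) : Prop :=
  ∀ v p, matched.get? v = some p → p.2 = PySem.Set.ofList (pvJ tag v (PySem.List.enumerate mpk2 0))

theorem pvStep_eq (tag : String) (mpk2 : List (List (String × String)))
    (matched : PySem.Dict String (PySem.Set Int × PySem.Set Int))
    (p1 : Int × List (String × String)) (hInv : pvInv tag mpk2 matched) :
    pvStepA tag mpk2 matched p1 = pvStepB tag (pvIdx tag mpk2) matched p1 ∧
      pvInv tag mpk2 (pvStepA tag mpk2 matched p1) := by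
  cases hv : (PySem.Dict.mk p1.2).get? tag with
  | none =>
    have ha : pvStepA tag mpk2 matched p1 = matched := by unfold pvStepA; rw [hv]
    have hb : pvStepB tag (pvIdx tag mpk2) matched p1 = matched := by unfold pvStepB; rw [hv]
    rw [ha, hb]
    exact ⟨rfl, hInv⟩
  | some v1 =>
    have ha : pvStepA tag mpk2 matched p1
        = (PySem.List.enumerate mpk2 0).foldl (pvInnerStep tag v1 p1.1) matched := by
      unfold pvStepA; rw [hv]
    have hb : pvStepB tag (pvIdx tag mpk2) matched p1
        = (match (pvIdx tag mpk2).get? v1 with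
           | none => matched
           | some js =>
             if matched.contains v1 then
               matched.modify v1 (PySem.Set.empty, PySem.Set.empty)
                 (fun p => (PySem.Set.add p.1 p1.1, p.2))
             else matched.insert v1 ((PySem.Set.ofList [p1.1] : PySem.Set Int), PySem.Set.ofList js)) := by
      unfold pvStepB; rw [hv]
    have hidx : (pvIdx tag mpk2).get? v1
        = if pvJ tag v1 (PySem.List.enumerate mpk2 0) = [] then none
          else some (pvJ tag v1 (PySem.List.enumerate mpk2 0)) := by
      unfold pvIdx
      rw [pvIdx_get]
      simp [PySem.Dict.get?_empty]
    rw [ha, hb, hidx, pvInner_eq]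
    by_cases hJ : pvJ tag v1 (PySem.List.enumerate mpk2 0) = []
    · rw [if_pos hJ, if_pos hJ]
      exact ⟨rfl, hInv⟩
    · rw [if_neg hJ, if_neg hJ]
      have hred : (match (some (pvJ tag v1 (PySem.List.enumerate mpk2 0)) : Option (List Int)) with
           | none => matched
           | some js =>
             if matched.contains v1 then
               matched.modify v1 (PySem.Set.empty, PySem.Set.empty)
                 (fun p => (PySem.Set.add p.1 p1.1, p.2))
             else matched.insert v1 ((PySem.Set.ofList [p1.1] : PySem.Set Int), PySem.Set.ofList js))
          = (if matched.contains v1 then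
               matched.modify v1 (PySem.Set.empty, PySem.Set.empty)
                 (fun p => (PySem.Set.add p.1 p1.1, p.2))
             else matched.insert v1 ((PySem.Set.ofList [p1.1] : PySem.Set Int),
               PySem.Set.ofList (pvJ tag v1 (PySem.List.enumerate mpk2 0)))) := rfl
      rw [hred]
      by_cases hc : matched.contains v1 = true
      · obtain ⟨p0, hp0⟩ : ∃ p0, matched.get? v1 = some p0 := by
          have := PySem.Dict.contains_eq_isSome_get? (d := matched) (k := v1)
          rw [hc] at this
          cases h' : matched.get? v1 with
          | none => rw [h'] at this; simp at this
          | some p0 => exact ⟨p0, rfl⟩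
        have hg : matched.getD v1 (PySem.Set.empty, PySem.Set.empty) = p0 :=
          PySem.Dict.getD_of_get?_eq_some _ _ hp0
        have h2 : p0.2 = PySem.Set.ofList (pvJ tag v1 (PySem.List.enumerate mpk2 0)) :=
          hInv v1 p0 hp0
        have hfold : (pvJ tag v1 (PySem.List.enumerate mpk2 0)).foldl PySem.Set.add p0.2 = p0.2 := by
          rw [h2]
          exact pvFoldl_add_subset _ _ (fun x hx => (PySem.Set.mem_ofList ..).mpr hx)
        have hmod : matched.modify v1 (PySem.Set.empty, PySem.Set.empty)
              (fun p => (PySem.Set.add p.1 p1.1, p.2))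
            = matched.insert v1 (PySem.Set.add p0.1 p1.1, p0.2) := by
          show matched.insert v1 _ = _
          rw [hg]
        rw [if_pos hc, hmod, hg, hfold]
        refine ⟨rfl, ?_⟩
        intro v q hq
        rw [PySem.Dict.get?_insert] at hq
        by_cases hvv : v = v1
        · subst hvv
          rw [if_pos rfl] at hq
          cases hq
          exact h2
        · rw [if_neg hvv] at hq
          exact hInv v q hq
      · have hcf : matched.contains v1 = false := by
          cases h' : matched.contains v1 with
          | false => rfl
          | true => exact absurd h' hc
        have hg : matched.getD v1 (PySem.Set.empty, PySem.Set.empty)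
            = (PySem.Set.empty, PySem.Set.empty) := PySem.Dict.getD_of_not_contains _ _ hcf
        rw [if_neg hc, hg]
        refine ⟨rfl, ?_⟩
        intro v q hq
        rw [PySem.Dict.get?_insert] at hq
        by_cases hvv : v = v1
        · subst hvv
          rw [if_pos rfl] at hq
          cases hq
          rfl
        · rw [if_neg hvv] at hq
          exact hInv v q hq

theorem pvFold_eq (tag : String) (mpk2 : List (List (String × String)))
    (l1 : List (Int × List (String × String)))
    (matched : PySem.Dict String (PySem.Set Int × PySem.Set Int)) (h : pvInv tag mpk2 matched) :
    l1.foldl (pvStepA tag mpk2) matched = l1.foldl (pvStepB tag (pvIdx tag mpk2)) matched := by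
  induction l1 generalizing matched with
  | nil => rfl
  | cons p t ih =>
    rw [List.foldl_cons, List.foldl_cons, (pvStep_eq tag mpk2 matched p h).1]
    rw [← (pvStep_eq tag mpk2 matched p h).1]
    exact ih _ (pvStep_eq tag mpk2 matched p h).2


-- ===== VERDICT (by name: the statement is the Claim_ definition above) =====
theorem compare_mpk_level_spec : Claim_equal_compare_mpk_level := by
  intro mpk1 mpk2 tag _
  unfold Spec_compare_mpk_level
  rw [pvA_eq, pvB_eq, pvFold_eq]
  intro v p hp
  rw [PySem.Dict.get?_empty] at hp
  exact absurd hp (by simp)
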